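-- pv_equiv track=rewrite | github.com/seb-patron/Algorithms | timsort/simplified_timsort.py | find_min_run
-- ===== SOURCE A (Python) =====
-- def find_min_run(n):
--     if n == 0:
--         return 1
--
--     r = 0
--     while n >= 32:
--         r |= n & 1
--         n >>= 1
--     return n + r
-- ===== SOURCE B (Python) =====
-- def find_min_run(n):
--     if n == 0:
--         return 1
--     if n < 32:
--         return n
--     shift = n.bit_length() - 5
--     return (n >> shift) + (1 if n & ((1 << shift) - 1) else 0)
-- ===== Notes on version B (the rewrite author's own statement) =====
-- stated objective: simpler
-- what changed: Replaces the bit-shifting while loop (which ORs together the shifted-out bits) with a closed-form computation from n.bit_length(): keep the top bits and add one when any discarded bit is set.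
import Mathlib
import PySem

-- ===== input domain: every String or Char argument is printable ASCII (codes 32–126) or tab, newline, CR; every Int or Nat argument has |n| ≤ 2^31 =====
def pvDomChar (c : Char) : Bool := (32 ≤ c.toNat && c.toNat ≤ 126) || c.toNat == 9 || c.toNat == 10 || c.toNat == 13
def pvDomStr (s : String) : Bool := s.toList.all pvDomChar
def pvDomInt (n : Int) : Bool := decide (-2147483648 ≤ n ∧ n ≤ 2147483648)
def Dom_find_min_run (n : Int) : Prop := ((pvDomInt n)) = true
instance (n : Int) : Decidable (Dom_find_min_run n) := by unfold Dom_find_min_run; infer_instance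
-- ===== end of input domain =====

-- B replaces A's bit-shifting while loop with a closed-form bit_length computation (same value everywhere).

-- ===== PORT A =====
-- the while loop: r |= n & 1; n >>= 1  while n >= 32; returns n + r
def findMinRunLoop (r n : Int) : Int :=
  if 32 ≤ n then
    findMinRunLoop (PySem.Int.bor r (PySem.Int.band n 1)) (n >>> (1 : Nat))
  else n + r
termination_by n.toNat
decreasing_by rw [Int.shiftRight_eq_div_pow]; omega

def find_min_run (n : Int) : Int :=
  if n = 0 then 1 else findMinRunLoop 0 n

-- ===== PORT B =====
def find_min_run_alt (n : Int) : Int :=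
  if n = 0 then 1
  else if n < 32 then n
  else
    let shift := PySem.Int.bitLength n - 5   -- n.bit_length() - 5
    (n >>> shift) + (if PySem.Int.band n ((1 <<< shift) - 1) ≠ 0 then 1 else 0)

-- ===== PRECONDITION & SPEC =====
def Spec_find_min_run (n : Int) (out : Int) : Prop := out = find_min_run_alt n
instance (n : Int) (out : Int) : Decidable (Spec_find_min_run n out) := by unfold Spec_find_min_run; infer_instance

-- ===== CLAIM (what is proved, stated in full; the proofs are below) =====
def Claim_equal_find_min_run : Prop := ∀ (n : Int), Dom_find_min_run n → Spec_find_min_run n (find_min_run n)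

-- ===== LEMMAS AND PROOFS =====

-- bit_length bounds for naturals
lemma bitLen_ge_six (m : Nat) (h : 32 ≤ m) : 6 ≤ PySem.Int.bitLength (m : Int) := by
  by_contra hc
  have h1 := PySem.Int.lt_two_pow_bitLength (m : Int)
  have h2 : 2 ^ PySem.Int.bitLength (m : Int) ≤ 2 ^ 5 :=
    Nat.pow_le_pow_right (by norm_num) (by omega)
  simp [Int.natAbs_natCast] at h1
  omega

lemma bitLen_eq_six (m : Nat) (h : 32 ≤ m) (h2 : m < 64) : PySem.Int.bitLength (m : Int) = 6 := by
  have hge := bitLen_ge_six m h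
  have hne : (m : Int) ≠ 0 := by omega
  have hlow := PySem.Int.two_pow_bitLength_le (m : Int) hne
  simp [Int.natAbs_natCast] at hlow
  by_contra hc
  have : 2 ^ 6 ≤ 2 ^ (PySem.Int.bitLength (m : Int) - 1) :=
    Nat.pow_le_pow_right (by norm_num) (by omega)
  omega

lemma band_cast_one (m : Nat) : PySem.Int.band (m : Int) 1 = ((m % 2 : Nat) : Int) := by
  have := PySem.Int.band_natCast m 1
  rw [Nat.and_one_is_mod] at this
  exact_mod_cast this

-- closed form of A's loop
lemma loop_closed (m : Nat) (hm : 32 ≤ m) (r : Int) (hr : r = 0 ∨ r = 1) :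
    findMinRunLoop r (m : Int) =
      ((m / 2 ^ (PySem.Int.bitLength (m : Int) - 5) : Nat) : Int) +
      (if m % 2 ^ (PySem.Int.bitLength (m : Int) - 5) = 0 then r else 1) := by
  induction m using Nat.strong_induction_on generalizing r with
  | _ m ih =>
  have hstep : findMinRunLoop r (m : Int) =
      findMinRunLoop (PySem.Int.bor r ((m % 2 : Nat) : Int)) ((m / 2 : Nat) : Int) := by
    rw [findMinRunLoop]
    rw [if_pos (by exact_mod_cast hm), band_cast_one, Int.shiftRight_eq_div_pow]
    norm_num
  have hm2 : ((m % 2 : Nat) : Int) = 0 ∨ ((m % 2 : Nat) : Int) = 1 := by omega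
  have hr' : PySem.Int.bor r ((m % 2 : Nat) : Int) = 0 ∨ PySem.Int.bor r ((m % 2 : Nat) : Int) = 1 := by
    rcases hr with h | h <;> rcases hm2 with h2 | h2 <;> rw [h, h2] <;> decide
  by_cases hbig : 64 ≤ m
  · -- step case: recurse on m / 2
    have hm2' : 32 ≤ m / 2 := by omega
    have hL : PySem.Int.bitLength (m : Int) = PySem.Int.bitLength ((m / 2 : Nat) : Int) + 1 :=
      PySem.Int.bitLength_natCast (by omega)
    have hL6 : 6 ≤ PySem.Int.bitLength ((m / 2 : Nat) : Int) := bitLen_ge_six _ hm2'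
    set L := PySem.Int.bitLength ((m / 2 : Nat) : Int) with hLdef
    rw [hstep, ih (m / 2) (by omega) hm2' _ hr']
    have hs : PySem.Int.bitLength (m : Int) - 5 = (L - 5) + 1 := by omega
    rw [hL] at hs ⊢
    have hdiv : m / 2 / 2 ^ (L - 5) = m / 2 ^ (L + 1 - 5) := by
      rw [Nat.div_div_eq_div_mul]
      congr 1
      rw [show L + 1 - 5 = (L - 5) + 1 by omega, pow_succ]
      ring
    have hmod : m % 2 ^ (L + 1 - 5) = m % 2 + 2 * (m / 2 % 2 ^ (L - 5)) := by
      rw [show L + 1 - 5 = (L - 5) + 1 by omega, pow_succ, mul_comm (2 ^ (L - 5)) 2]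
      exact Nat.mod_mul
    rw [hdiv]
    congr 1
    rcases Nat.mod_two_eq_zero_or_one m with h2 | h2
    · have hz : ((m % 2 : Nat) : Int) = 0 := by omega
      rw [hz, PySem.Int.bor_zero]
      have : m % 2 ^ (L + 1 - 5) = 0 ↔ m / 2 % 2 ^ (L - 5) = 0 := by omega
      rw [← hLdef]
      simp only [this]
    · have ho : ((m % 2 : Nat) : Int) = 1 := by omega
      have hb1 : PySem.Int.bor r ((m % 2 : Nat) : Int) = 1 := by
        rcases hr with h | h <;> rw [h, ho] <;> decide
      have hnz : ¬ (m % 2 ^ (L + 1 - 5) = 0) := by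
        have h1 : 0 < 2 ^ (L - 5) := Nat.one_le_two_pow
        omega
      rw [hb1, if_neg hnz]
      split <;> rfl
  · -- base case: 32 ≤ m < 64, one more unfold terminates
    have hL : PySem.Int.bitLength (m : Int) = 6 := bitLen_eq_six m hm (by omega)
    have hsmall : ¬ (32 ≤ ((m / 2 : Nat) : Int)) := by omega
    rw [hstep, findMinRunLoop, if_neg hsmall, hL]
    have hdiv : m / 2 ^ (6 - 5) = m / 2 := by norm_num
    rw [hdiv]
    rcases Nat.mod_two_eq_zero_or_one m with h2 | h2
    · have hz : ((m % 2 : Nat) : Int) = 0 := by omega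
      rw [hz, PySem.Int.bor_zero, if_pos (by simpa using h2)]
    · have ho : ((m % 2 : Nat) : Int) = 1 := by omega
      have hb1 : PySem.Int.bor r ((m % 2 : Nat) : Int) = 1 := by
        rcases hr with h | h <;> rw [h, ho] <;> decide
      rw [hb1, if_neg (by simp [h2])]

-- ===== VERDICT (by name: the statement is the Claim_ definition above) =====
theorem find_min_run_spec : Claim_equal_find_min_run := by
  intro n _
  unfold Spec_find_min_run find_min_run find_min_run_alt
  by_cases h0 : n = 0
  · simp [h0]
  · rw [if_neg h0, if_neg h0]
    by_cases hlt : n < 32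
    · rw [if_pos hlt, findMinRunLoop, if_neg (by omega)]
      ring
    · rw [if_neg hlt]
      have hm : 32 ≤ n.toNat := by omega
      have hn : n = ((n.toNat : Nat) : Int) := by omega
      rw [hn, loop_closed n.toNat hm 0 (Or.inl rfl)]
      set m := n.toNat
      set s := PySem.Int.bitLength (m : Int) - 5 with hs
      have hshr : ((m : Int) >>> s) = ((m / 2 ^ s : Nat) : Int) := by
        rw [← Int.natCast_shiftRight, Nat.shiftRight_eq_div_pow]
      have hband : PySem.Int.band (m : Int) (((1 <<< s : Nat) : Int) - 1) = ((m % 2 ^ s : Nat) : Int) := by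
        rw [show ((1 <<< s : Nat) : Int) = ((2 ^ s : Nat) : Int) by norm_num [Nat.shiftLeft_eq]]
        have h1 : ((2 ^ s : Nat) : Int) - 1 = (((2 ^ s - 1 : Nat)) : Int) := by
          have : 1 ≤ 2 ^ s := Nat.one_le_two_pow
          omega
        rw [h1, PySem.Int.band_natCast, Nat.and_two_pow_sub_one_eq_mod]
      simp only [hshr, hband]
      rcases Nat.eq_zero_or_pos (m % 2 ^ s) with hz | hp
      · simp [hz]
      · rw [if_neg (by omega), if_pos (by exact_mod_cast Nat.pos_iff_ne_zero.mp hp)]
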